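-- pv_equiv track=rewrite | github.com/mattkistner/CS-1301 | HW06.py | cheapestLocations
-- ===== SOURCE A (Python) =====
-- def cheapestLocations(activities):
--     cheapDict = {}
--     for activity in activities:
--         tup4Sort = ()
--         locations = activities[activity]
--         if activities[activity] == {}:
--             continue
--         for location in locations:
--             price = locations[location]
--             tup4Sort += ((price, location),)
--         cheapDict[activity] = sorted(tup4Sort)[0][1]
--     return cheapDict
--     pass
-- ===== SOURCE B (Python) =====
-- def cheapestLocations(activities):
--     result = {}
--     for activity, locations in activities.items():
--         best = None
--         for location, price in locations.items():
--             if best is None or (price, location) < best: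
--                 best = (price, location)
--         if best is not None:
--             result[activity] = best[1]
--     return result
-- ===== Notes on version B (the rewrite author's own statement) =====
-- stated objective: simpler
-- what changed: Replaces A's per-activity build-tuples-via-dict-lookup then sort-and-take-first with a single linear pass that keeps a running (price, location) minimum, iterating dict items directly instead of looking each key up again.
import Mathlib
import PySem

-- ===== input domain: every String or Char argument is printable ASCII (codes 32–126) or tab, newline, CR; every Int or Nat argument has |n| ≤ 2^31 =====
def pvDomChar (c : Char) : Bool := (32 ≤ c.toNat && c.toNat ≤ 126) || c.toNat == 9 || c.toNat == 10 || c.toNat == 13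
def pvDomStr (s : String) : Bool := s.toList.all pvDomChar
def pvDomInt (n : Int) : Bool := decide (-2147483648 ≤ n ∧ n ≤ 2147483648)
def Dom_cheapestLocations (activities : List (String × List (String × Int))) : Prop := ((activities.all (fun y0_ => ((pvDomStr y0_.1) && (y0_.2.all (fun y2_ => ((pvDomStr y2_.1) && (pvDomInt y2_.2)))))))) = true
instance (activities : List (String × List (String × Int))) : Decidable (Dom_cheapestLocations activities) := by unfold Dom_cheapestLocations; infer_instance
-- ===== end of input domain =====

-- B replaces A's build-tuples-then-sort-then-take-first per activity with a single
-- linear pass keeping a running (price, location) minimum (objective: simpler).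

-- ===== PORT A =====
-- A iterates the dict's keys and looks every key up again; ported on the assoc
-- list with PySem.Dict lookup (first match). The `getD` defaults and the `none`
-- head? branch are totality guards only: the keys come from the dict itself and
-- the sorted list is nonempty on that branch, so Python never raises there.
def cheapestLocations (activities : List (String × List (String × Int))) : List (String × String) :=
  ((activities.map Prod.fst).foldl
    (fun (cheapDict : PySem.Dict String String) activity =>
      let locations := (PySem.Dict.mk activities).getD activity []
      if locations = [] then cheapDict
      else
        let tup4Sort := (locations.map Prod.fst).foldl
          (fun acc location => acc ++ [((PySem.Dict.mk locations).getD location 0, location)]) []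
        match (PySem.List.sorted2 tup4Sort (fun t => t.1) (fun t => t.2)).head? with
        | some t => cheapDict.insert activity t.2
        | none => cheapDict)
    PySem.Dict.empty).items

-- ===== PORT B =====
-- running minimum over the location items, Python tuple comparison spelled out
def pvBest (locations : List (String × Int)) : Option (Int × String) :=
  locations.foldl
    (fun best q =>
      match best with
      | none => some (q.2, q.1)
      | some b => if q.2 < b.1 ∨ (q.2 = b.1 ∧ q.1 < b.2) then some (q.2, q.1) else some b)
    none

def cheapestLocations_alt (activities : List (String × List (String × Int))) : List (String × String) :=
  (activities.foldl
    (fun (result : PySem.Dict String String) p =>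
      match pvBest p.2 with
      | none => result
      | some b => result.insert p.1 b.2)
    PySem.Dict.empty).items

-- ===== PRECONDITION & SPEC =====
-- Pre_ excludes assoc lists with duplicate activity keys or duplicate location
-- keys: a Python dict cannot hold duplicates, so such lists do not represent a
-- dict input and the collapse order on them is accidental.
def Pre_cheapestLocations (activities : List (String × List (String × Int))) : Prop :=
  (activities.map Prod.fst).Nodup ∧ ∀ p ∈ activities, (p.2.map Prod.fst).Nodup
instance (activities : List (String × List (String × Int))) : Decidable (Pre_cheapestLocations activities) := by unfold Pre_cheapestLocations; infer_instance
def pvWitness_cheapestLocations : (List (String × List (String × Int))) :=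
  [("hike", [("park", 3), ("trail", 3)]), ("swim", []), ("eat", [("cafe", 7)])]

def Spec_cheapestLocations (activities : List (String × List (String × Int))) (out : List (String × String)) : Prop := out = cheapestLocations_alt activities
instance (activities : List (String × List (String × Int))) (out : List (String × String)) : Decidable (Spec_cheapestLocations activities out) := by unfold Spec_cheapestLocations; infer_instance

-- ===== CLAIM (what is proved, stated in full; the proofs are below) =====
def Claim_equal_cheapestLocations : Prop := ∀ (activities : List (String × List (String × Int))), Dom_cheapestLocations activities → Pre_cheapestLocations activities → Spec_cheapestLocations activities (cheapestLocations activities)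

-- ===== LEMMAS AND PROOFS =====

-- Python's lexicographic tuple 'less than' on (Int × String), as a Bool
def pvLt (a b : Int × String) : Bool :=
  decide (a.1 < b.1) || (!decide (b.1 < a.1) && decide (a.2 < b.2))

lemma head?_insertBy (x : Int × String) (ys : List (Int × String)) :
    (PySem.List.insertBy pvLt x ys).head? =
      some (match ys.head? with | none => x | some m => if pvLt x m then x else m) := by
  cases ys with
  | nil => simp [PySem.List.insertBy]
  | cons y t =>
      simp only [PySem.List.insertBy, List.head?]
      split_ifs with h <;> simp

lemma head?_foldl_insertBy (xs : List (Int × String)) (acc : List (Int × String)) :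
    (xs.foldl (fun acc x => PySem.List.insertBy pvLt x acc) acc).head? =
      xs.foldl
        (fun b x => match b with
          | none => some x
          | some m => if pvLt x m then some x else some m)
        acc.head? := by
  induction xs generalizing acc with
  | nil => rfl
  | cons x t ih =>
      simp only [List.foldl]
      rw [ih, head?_insertBy]
      cases acc with
      | nil => rfl
      | cons a r => simp only [List.head?]; split_ifs with h <;> rfl

lemma foldl_append_singleton {α β : Type} (f : α → β) :
    ∀ (xs : List α) (acc : List β), xs.foldl (fun acc x => acc ++ [f x]) acc = acc ++ xs.map f
  | [], acc => by simp
  | x :: t, acc => by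
      simp only [List.foldl, List.map]
      rw [foldl_append_singleton f t (acc ++ [f x])]
      simp

-- the dict lookup on a nodup assoc list returns the pair's own value
lemma getD_mk_of_nodup {ν : Type} (l : List (String × ν)) (h : (l.map Prod.fst).Nodup)
    (p : String × ν) (hp : p ∈ l) (d : ν) : (PySem.Dict.mk l).getD p.1 d = p.2 := by
  induction l with
  | nil => cases hp
  | cons q t ih =>
      obtain ⟨k, v⟩ := q
      simp only [List.map, List.nodup_cons] at h
      rcases List.mem_cons.1 hp with rfl | hmem
      · simp [PySem.Dict.getD, PySem.Dict.get?_mk_cons]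
      · have hne : ¬ (k == p.1) := by
          simp only [beq_iff_eq]
          intro he; exact h.1 (he ▸ List.mem_map_of_mem hmem)
        have := ih h.2 hmem
        simpa [PySem.Dict.getD, PySem.Dict.get?_mk_cons, hne] using this

-- A's per-activity tuple list, once lookups are resolved, is just the swapped pairs
lemma tup4Sort_eq (locs : List (String × Int)) (h : (locs.map Prod.fst).Nodup) :
    (locs.map Prod.fst).foldl
      (fun acc location => acc ++ [((PySem.Dict.mk locs).getD location 0, location)]) []
      = locs.map (fun q => (q.2, q.1)) := by
  rw [List.foldl_map]
  have : ∀ (acc : List (Int × String)), ∀ q ∈ locs,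
      acc ++ [((PySem.Dict.mk locs).getD q.1 0, q.1)] = acc ++ [(q.2, q.1)] := by
    intro acc q hq; rw [getD_mk_of_nodup locs h q hq]
  rw [PySem.List.foldl_congr_mem _ _ _ _ this]
  exact foldl_append_singleton (fun q => (q.2, q.1)) locs []

-- B's running minimum equals the head of A's sorted tuple list
lemma pvBest_eq_head (locs : List (String × Int)) :
    pvBest locs =
      (PySem.List.sorted2 (locs.map (fun q => (q.2, q.1))) (fun t => t.1) (fun t => t.2)).head? := by
  show _ = (((locs.map (fun q => (q.2, q.1))).foldl
      (fun acc x => PySem.List.insertBy pvLt x acc) []).head?)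
  rw [head?_foldl_insertBy, List.foldl_map]
  unfold pvBest
  apply PySem.List.foldl_congr_mem
  intro b q hq
  cases b with
  | none => rfl
  | some m =>
      have hiff : pvLt (q.2, q.1) m = true ↔ (q.2 < m.1 ∨ (q.2 = m.1 ∧ q.1 < m.2)) := by
        unfold pvLt
        simp only [Bool.or_eq_true, Bool.and_eq_true, Bool.not_eq_true',
          decide_eq_true_iff, decide_eq_false_iff_not]
        constructor
        · rintro (h | ⟨h1, h2⟩)
          · exact Or.inl h
          · by_cases h3 : q.2 < m.1
            · exact Or.inl h3
            · exact Or.inr ⟨le_antisymm (not_lt.1 h1) (not_lt.1 h3), h2⟩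
        · rintro (h | ⟨h1, h2⟩)
          · exact Or.inl h
          · exact Or.inr ⟨by simp [h1], h2⟩
      by_cases hc : q.2 < m.1 ∨ (q.2 = m.1 ∧ q.1 < m.2)
      · simp only [if_pos hc, if_pos (hiff.2 hc)]
      · simp only [if_neg hc, if_neg (fun hb => hc (hiff.1 hb))]

-- ===== VERDICT (by name: the statement is the Claim_ definition above) =====
theorem cheapestLocations_spec : Claim_equal_cheapestLocations := by
  intro activities _ hpre
  unfold Spec_cheapestLocations cheapestLocations cheapestLocations_alt
  rw [List.foldl_map]
  refine congrArg PySem.Dict.items (PySem.List.foldl_congr_mem _ _ _ _ ?_)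
  intro acc p hp
  simp only
  rw [getD_mk_of_nodup activities hpre.1 p hp]
  by_cases h0 : p.2 = []
  · simp [h0, pvBest]
  · rw [if_neg h0, tup4Sort_eq p.2 (hpre.2 p hp), ← pvBest_eq_head]
    cases pvBest p.2 <;> rfl
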